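-- pv_equiv track=rewrite | github.com/fatupopzz/lab-combinatoria | problema1.py | clasificar_por_repeticion
-- ===== SOURCE A (Python) =====
-- def clasificar_por_repeticion(sucesion):
--     """
--     Clasifica una sucesión según el patrón de repetición.
--     Retorna el tipo de repetición:
--     - 'cuatro_iguales': un dígito aparece 4 veces
--     - 'dos_pares': dos dígitos aparecen 2 veces cada uno
--     - 'un_par': un dígito aparece 2 veces, los otros son únicos
--     - 'triple': un dígito aparece 3 veces, otro aparece 1 vez
--     - None si todos son diferentes
--     """
--     conteo_digitos = {}
--     for digito in sucesion:
--         conteo_digitos[digito] = conteo_digitos.get(digito, 0) + 1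
--
--     # Ordenamos las frecuencias de mayor a menor
--     frecuencias = sorted(conteo_digitos.values(), reverse=True)
--
--     if frecuencias == [4]:
--         return 'cuatro_iguales'
--     elif frecuencias == [2, 2]:
--         return 'dos_pares'
--     elif frecuencias == [2, 1, 1]:
--         return 'un_par'
--     elif frecuencias == [3, 1]:
--         return 'triple'
--     else:
--         return None
-- ===== SOURCE B (Python) =====
-- def clasificar_por_repeticion(sucesion):
--     """
--     Clasifica una sucesion segun el patron de repeticion, sin ordenar:
--     decide a partir de tres estadisticas del conteo (total, numero de
--     valores distintos, frecuencia maxima).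
--     """
--     conteo = {}
--     for digito in sucesion:
--         conteo[digito] = conteo.get(digito, 0) + 1
--
--     total = sum(conteo.values())
--     if total != 4:
--         return None
--     n_distintos = len(conteo)
--     if n_distintos == 1:
--         return 'cuatro_iguales'
--     if n_distintos == 2:
--         return 'triple' if max(conteo.values()) == 3 else 'dos_pares'
--     if n_distintos == 3:
--         return 'un_par'
--     return None
-- ===== Notes on version B (the rewrite author's own statement) =====
-- stated objective: simpler
-- what changed: B replaces A's sort-the-frequencies-and-compare-against-list-literals classification by a direct branch on three statistics of the count map (sum of counts, number of distinct values, maximum count), eliminating the sort entirely.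
import Mathlib
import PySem

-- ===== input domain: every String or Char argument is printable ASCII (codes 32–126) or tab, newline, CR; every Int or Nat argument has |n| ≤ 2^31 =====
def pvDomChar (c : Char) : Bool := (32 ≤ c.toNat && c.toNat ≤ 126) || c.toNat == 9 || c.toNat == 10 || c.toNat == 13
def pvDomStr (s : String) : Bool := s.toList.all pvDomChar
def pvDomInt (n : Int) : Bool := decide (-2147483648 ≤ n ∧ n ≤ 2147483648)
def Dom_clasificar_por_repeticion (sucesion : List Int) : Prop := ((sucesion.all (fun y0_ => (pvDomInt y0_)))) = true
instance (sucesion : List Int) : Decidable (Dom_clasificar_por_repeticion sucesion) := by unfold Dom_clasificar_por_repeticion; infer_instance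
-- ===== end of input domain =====

-- B classifies by total / number-of-distinct / maximum-count statistics instead of
-- sorting the frequency list and comparing it with list literals (objective: simpler).

-- ===== PORT A =====
def clasificar_por_repeticion (sucesion : List Int) : Option String :=
  let conteo_digitos : PySem.Dict Int Int := sucesion.foldl
    (fun d digito => d.insert digito (d.getD digito 0 + 1)) PySem.Dict.empty
  let frecuencias := PySem.List.sorted conteo_digitos.values (fun v => v) true
  if frecuencias = [4] then some "cuatro_iguales"
  else if frecuencias = [2, 2] then some "dos_pares"
  else if frecuencias = [2, 1, 1] then some "un_par"
  else if frecuencias = [3, 1] then some "triple"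
  else none

-- ===== PORT B =====
def clasificar_por_repeticion_alt (sucesion : List Int) : Option String :=
  let conteo : PySem.Dict Int Int := sucesion.foldl
    (fun d digito => d.insert digito (d.getD digito 0 + 1)) PySem.Dict.empty
  let total := conteo.values.sum
  if total ≠ 4 then none
  else if conteo.size = 1 then some "cuatro_iguales"
  else if conteo.size = 2 then
    if PySem.List.max? conteo.values (fun v => v) = some 3 then some "triple"
    else some "dos_pares"
  else if conteo.size = 3 then some "un_par"
  else none

-- ===== PRECONDITION & SPEC =====
def Spec_clasificar_por_repeticion (sucesion : List Int) (out : Option String) : Prop := out = clasificar_por_repeticion_alt sucesion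
instance (sucesion : List Int) (out : Option String) : Decidable (Spec_clasificar_por_repeticion sucesion out) := by unfold Spec_clasificar_por_repeticion; infer_instance

-- ===== CLAIM (what is proved, stated in full; the proofs are below) =====
def Claim_equal_clasificar_por_repeticion : Prop := ∀ (sucesion : List Int), Dom_clasificar_por_repeticion sucesion → Spec_clasificar_por_repeticion sucesion (clasificar_por_repeticion sucesion)

-- ===== LEMMAS AND PROOFS =====

-- Core fact: on a list of positive frequencies, A's sorted-list comparison equals
-- B's statistics branch.
theorem pv_classify_core (vals : List Int) (hpos : ∀ v ∈ vals, 1 ≤ v) :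
    (if PySem.List.sorted vals (fun v => v) true = [4] then some "cuatro_iguales"
     else if PySem.List.sorted vals (fun v => v) true = [2, 2] then some "dos_pares"
     else if PySem.List.sorted vals (fun v => v) true = [2, 1, 1] then some "un_par"
     else if PySem.List.sorted vals (fun v => v) true = [3, 1] then some "triple"
     else (none : Option String))
  = (if vals.sum ≠ 4 then none
     else if vals.length = 1 then some "cuatro_iguales"
     else if vals.length = 2 then
       if PySem.List.max? vals (fun v => v) = some 3 then some "triple"
       else some "dos_pares"
     else if vals.length = 3 then some "un_par"
     else none) := by
  obtain ⟨s, hperm, hpair, hs⟩ :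
      ∃ s : List Int, s.Perm vals ∧ s.Pairwise (fun a b => b ≤ a) ∧
        PySem.List.sorted vals (fun v => v) true = s :=
    ⟨_, PySem.List.sorted_perm vals (fun v => v) true,
      PySem.List.sorted_pairwise_rev vals (fun v => v), rfl⟩
  rw [hs]
  have hsum : s.sum = vals.sum := hperm.sum_eq
  have hlen : s.length = vals.length := hperm.length_eq
  have hposs : ∀ v ∈ s, 1 ≤ v := fun v hv => hpos v (hperm.mem_iff.mp hv)
  match s, hperm, hpair, hsum, hlen, hposs with
  | [], hperm, hpair, hsum, hlen, hposs =>
      have h0 : vals.sum = 0 := by simpa using hsum.symm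
      simp [h0]
  | [a], hperm, hpair, hsum, hlen, hposs =>
      have h1 : vals.sum = a := by simpa using hsum.symm
      by_cases ha : a = 4 <;> simp [← hlen, h1, ha]
  | [a, b], hperm, hpair, hsum, hlen, hposs =>
      have h2 : vals.sum = a + b := by simpa using hsum.symm
      have hba : b ≤ a := by simp [List.pairwise_cons] at hpair; exact hpair
      have ha1 : 1 ≤ a := hposs a (by simp)
      have hb1 : 1 ≤ b := hposs b (by simp)
      -- the maximum of vals is a
      have hmax : PySem.List.max? vals (fun v => v) = some a := by
        cases hmv : PySem.List.max? vals (fun v => v) with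
        | none =>
            have hnil : vals = [] := (PySem.List.max?_eq_none_iff _ _).mp hmv
            rw [hnil] at hlen; simp at hlen
        | some m =>
            have hmmem : m ∈ vals := PySem.List.max?_mem hmv
            have hm2 : m ∈ [a, b] := hperm.mem_iff.mpr hmmem
            have hamem : a ∈ vals := hperm.mem_iff.mp (by simp)
            have hle : a ≤ m := PySem.List.max?_isMax hmv a hamem
            have : m = a := by simp at hm2; omega
            rw [this]
      rw [← hlen, h2, hmax]
      by_cases h4 : a + b = 4
      · by_cases ha3 : a = 3
        · have hb : b = 1 := by omega
          simp [ha3, hb]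
        · have ha2 : a = 2 := by omega
          have hb : b = 2 := by omega
          simp [ha2, hb]
      · have hne2 : ¬ (a = 2 ∧ b = 2) := by omega
        have hne3 : ¬ (a = 3 ∧ b = 1) := by omega
        have e1 : ¬([a, b] = ([4] : List Int)) := by simp
        have e2 : ¬([a, b] = ([2, 2] : List Int)) := by
          intro h; simp at h; omega
        have e3 : ¬([a, b] = ([2, 1, 1] : List Int)) := by simp
        have e4 : ¬([a, b] = ([3, 1] : List Int)) := by
          intro h; simp at h; omega
        rw [if_pos h4, if_neg e1, if_neg e2, if_neg e3, if_neg e4]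
  | [a, b, c], hperm, hpair, hsum, hlen, hposs =>
      have h3 : vals.sum = a + b + c := by simp at hsum; omega
      have hpc : b ≤ a ∧ c ≤ a ∧ c ≤ b := by
        simp [List.pairwise_cons] at hpair; tauto
      have ha1 : 1 ≤ a := hposs a (by simp)
      have hb1 : 1 ≤ b := hposs b (by simp)
      have hc1 : 1 ≤ c := hposs c (by simp)
      rw [← hlen, h3]
      by_cases h4 : a + b + c = 4
      · have : a = 2 ∧ b = 1 ∧ c = 1 := by omega
        simp [this.1, this.2.1, this.2.2]
      · simp [h4]
        intro h1' h2' h3'; omega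
  | a :: b :: c :: d :: t, hperm, hpair, hsum, hlen, hposs =>
      -- length ≥ 4: both sides are none regardless of the sum
      rw [← hlen]
      by_cases h4 : vals.sum = 4 <;> simp [h4]

-- values of the counter dict are the counts of the distinct elements, hence positive
theorem pv_counter_values_pos (xs : List Int) :
    ∀ v ∈ (PySem.Dict.counter xs).values, 1 ≤ v := by
  intro v hv
  have : (PySem.Dict.counter xs).values
      = (PySem.Set.ofList xs).map (fun k => ((xs.count k : Nat) : Int)) := by
    simp [PySem.Dict.values, PySem.Dict.items_counter, List.map_map, Function.comp]
  rw [this] at hv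
  simp at hv
  obtain ⟨k, hk, hkeq⟩ := hv
  have : 0 < xs.count k := List.count_pos_iff.mpr hk
  omega

theorem pv_size_eq_values_length {κ ν : Type} [BEq κ] (d : PySem.Dict κ ν) :
    d.size = d.values.length := by
  simp [PySem.Dict.size, PySem.Dict.values]

-- ===== VERDICT (by name: the statement is the Claim_ definition above) =====
theorem clasificar_por_repeticion_spec : Claim_equal_clasificar_por_repeticion := by
  intro sucesion _
  unfold Spec_clasificar_por_repeticion clasificar_por_repeticion clasificar_por_repeticion_alt
  simp only [pv_size_eq_values_length]
  rw [PySem.Dict.foldl_insert_getD_add_one_eq_counter]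
  exact pv_classify_core (PySem.Dict.counter sucesion).values
    (pv_counter_values_pos sucesion)
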